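-- pv_equiv track=rewrite | github.com/jpdotcom/Hackerrank-solutions | IntervalSelction(Medium)Solution.py | intervalSelection
-- ===== SOURCE A (Python) =====
-- def intervalSelection(intervals):
--   intervals.sort(key=lambda x:(x[1],x[0]))
--   ans=[intervals[0]]
--   idx=1
--   limit=0
--   while idx<len(intervals):
--     ans.append(intervals[idx])
--
--     if ans[-2][1]>=ans[-1][0]:
--       if limit>=ans[-1][0]:
--         ans.pop()
--       else:
--         limit=ans[-2][1]
--
--     idx+=1
--
--   return len(ans)
-- ===== SOURCE B (Python) =====
-- def intervalSelection(intervals):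
--   # Two-row view: a kept set with no point in three intervals splits into two
--   # non-overlapping rows; scan the sorted list as alternating skip-runs and
--   # placements, counting the skipped intervals and returning n - skipped.
--   # (Like A, this sorts `intervals` in place.)
--   intervals.sort(key=lambda x: (x[1], x[0]))
--   n = len(intervals)
--   row_a, row_b = 0, intervals[0][1]   # last end of each row; row_b holds the newest
--   skipped = 0
--   i = 1
--   while i < n:
--     # drop the maximal run of intervals that would overlap both rows
--     j = i
--     while j < n and row_a >= intervals[j][0] and row_b >= intervals[j][0]:
--       j += 1
--     skipped += j - i
--     if j == n:
--       break
--     cur = intervals[j]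
--     if row_b >= cur[0]:
--       row_a = row_b
--     row_b = cur[1]
--     i = j + 1
--   return n - skipped
-- ===== Notes on version B (the rewrite author's own statement) =====
-- stated objective: alternative
-- what changed: B reframes the scan as two-machine placement: an outer loop per placed interval with an inner loop that drops the maximal run of intervals overlapping both row ends, counting skips and returning n - skipped, instead of A's per-element speculative append / negative-index / pop on a growing ans list.
import Mathlib
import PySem

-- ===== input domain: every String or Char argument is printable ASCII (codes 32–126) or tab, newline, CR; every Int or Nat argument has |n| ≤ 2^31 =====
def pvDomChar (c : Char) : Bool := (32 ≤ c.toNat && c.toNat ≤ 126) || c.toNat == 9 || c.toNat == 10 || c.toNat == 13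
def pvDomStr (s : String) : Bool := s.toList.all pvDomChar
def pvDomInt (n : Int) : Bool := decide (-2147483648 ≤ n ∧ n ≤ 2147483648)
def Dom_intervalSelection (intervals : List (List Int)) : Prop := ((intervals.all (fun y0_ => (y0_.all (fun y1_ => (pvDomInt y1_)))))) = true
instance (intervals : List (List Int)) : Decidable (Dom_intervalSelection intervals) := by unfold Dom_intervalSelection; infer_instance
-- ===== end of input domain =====

-- B reframes A's speculative append/pop scan over a growing `ans` list as a two-row placement
-- scan: an outer loop per placed interval with an inner skip-run loop, returning n - skipped
-- (alternative decomposition, same O(n log n) cost). Both A and B sort `intervals` in place;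
-- the equivalence proved here is about the return value (the in-place sort is identical).

-- ===== PORT A =====
-- A's while-loop over idx = 1 .. len-1 of the sorted list, carrying the `ans` list and `limit`.
-- ans.pop() on the always-nonempty ans1 is ported as dropLast (exact on nonempty lists).
def intervalSelectionLoopA (rest : List (List Int)) (ans : List (List Int)) (limit : Int) : Int :=
  match rest with
  | [] => (ans.length : Int)
  | cur :: rest' =>
    let ans1 := ans ++ [cur]
    if PySem.List.pyGetD (PySem.List.pyGetD ans1 (-2) []) 1 0 ≥
       PySem.List.pyGetD (PySem.List.pyGetD ans1 (-1) []) 0 0 then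
      if limit ≥ PySem.List.pyGetD (PySem.List.pyGetD ans1 (-1) []) 0 0 then
        intervalSelectionLoopA rest' ans1.dropLast limit
      else
        intervalSelectionLoopA rest' ans1 (PySem.List.pyGetD (PySem.List.pyGetD ans1 (-2) []) 1 0)
    else intervalSelectionLoopA rest' ans1 limit

def intervalSelection (intervals : List (List Int)) : Int :=
  let s := PySem.List.sorted2 intervals (fun x => PySem.List.pyGetD x 1 0) (fun x => PySem.List.pyGetD x 0 0)
  intervalSelectionLoopA (s.drop 1) [PySem.List.pyGetD s 0 []] 0

-- ===== PORT B =====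
-- B's inner while-loop: drop the maximal run of intervals overlapping both row ends,
-- returning (run length, remainder).
def intervalSelectionSkipRun (rest : List (List Int)) (rowA rowB : Int) : Int × List (List Int) :=
  match rest with
  | [] => (0, [])
  | cur :: rest' =>
    if rowA ≥ PySem.List.pyGetD cur 0 0 ∧ rowB ≥ PySem.List.pyGetD cur 0 0 then
      let p := intervalSelectionSkipRun rest' rowA rowB
      (p.1 + 1, p.2)
    else (0, cur :: rest')

-- termination lemma for the outer loop (cited in decreasing_by)
lemma intervalSelectionSkipRun_length (rest : List (List Int)) (rowA rowB : Int) :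
    (intervalSelectionSkipRun rest rowA rowB).2.length ≤ rest.length := by
  induction rest with
  | nil => simp [intervalSelectionSkipRun]
  | cons cur rest' ih =>
    simp only [intervalSelectionSkipRun]
    split_ifs
    · simpa using Nat.le_succ_of_le ih
    · simp

-- B's outer while-loop: total number of intervals skipped in `rest`.
def intervalSelectionLoopB (rest : List (List Int)) (rowA rowB : Int) : Int :=
  let p := intervalSelectionSkipRun rest rowA rowB
  if hne : p.2 = [] then p.1
  else
    p.1 + intervalSelectionLoopB p.2.tail
            (if rowB ≥ PySem.List.pyGetD (p.2.head hne) 0 0 then rowB else rowA)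
            (PySem.List.pyGetD (p.2.head hne) 1 0)
termination_by rest.length
decreasing_by
  have h1 := intervalSelectionSkipRun_length rest rowA rowB
  have h2 : 0 < (intervalSelectionSkipRun rest rowA rowB).2.length := List.length_pos_iff.mpr hne
  simp only [List.length_tail]
  omega

def intervalSelection_alt (intervals : List (List Int)) : Int :=
  let s := PySem.List.sorted2 intervals (fun x => PySem.List.pyGetD x 1 0) (fun x => PySem.List.pyGetD x 0 0)
  (s.length : Int) - intervalSelectionLoopB (s.drop 1) 0 (PySem.List.pyGetD (PySem.List.pyGetD s 0 []) 1 0)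

-- ===== PRECONDITION & SPEC =====
-- Pre_ excludes exactly the inputs on which Python A raises IndexError: the empty list
-- (intervals[0]) and inner lists of length < 2 (x[1]/x[0] in the sort key or the loop).
def Pre_intervalSelection (intervals : List (List Int)) : Prop :=
  intervals ≠ [] ∧ ∀ l ∈ intervals, 2 ≤ l.length
instance (intervals : List (List Int)) : Decidable (Pre_intervalSelection intervals) := by
  unfold Pre_intervalSelection; infer_instance
def pvWitness_intervalSelection : List (List Int) := [[0, 1]]

def Spec_intervalSelection (intervals : List (List Int)) (out : Int) : Prop := out = intervalSelection_alt intervals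
instance (intervals : List (List Int)) (out : Int) : Decidable (Spec_intervalSelection intervals out) := by unfold Spec_intervalSelection; infer_instance

-- ===== CLAIM (what is proved, stated in full; the proofs are below) =====
def Claim_equal_intervalSelection : Prop := ∀ (intervals : List (List Int)), Dom_intervalSelection intervals → Pre_intervalSelection intervals → Spec_intervalSelection intervals (intervalSelection intervals)

-- ===== LEMMAS AND PROOFS =====

-- ans1[-2] of ans1 = ans ++ [cur] is ans[-1] when ans is nonempty
lemma pyGetD_neg_two_append_singleton (ans : List (List Int)) (cur : List Int) (h : ans ≠ []) :
    PySem.List.pyGetD (ans ++ [cur]) (-2) [] = PySem.List.pyGetD ans (-1) [] := by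
  have hlen : 1 ≤ ans.length := List.length_pos_iff.mpr h
  rw [PySem.List.pyGetD_neg_ofNat (ans ++ [cur]) 2 [] (by omega) (by simp; omega),
      PySem.List.pyGetD_neg_ofNat ans 1 [] (by omega) (by omega)]
  simp
  rw [List.getElem_append_left (by omega)]

-- One-step unfolding of skipRun on a cons cell
lemma skipRun_cons (cur : List Int) (rest' : List (List Int)) (rowA rowB : Int) :
    intervalSelectionSkipRun (cur :: rest') rowA rowB =
      if rowA ≥ PySem.List.pyGetD cur 0 0 ∧ rowB ≥ PySem.List.pyGetD cur 0 0 then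
        ((intervalSelectionSkipRun rest' rowA rowB).1 + 1, (intervalSelectionSkipRun rest' rowA rowB).2)
      else (0, cur :: rest') := by
  rw [intervalSelectionSkipRun]

-- Unfolding loopB one element at a time (bridging the skip-run structure to a per-element view)
lemma loopB_cons (cur : List Int) (rest' : List (List Int)) (rowA rowB : Int) :
    intervalSelectionLoopB (cur :: rest') rowA rowB =
      if rowA ≥ PySem.List.pyGetD cur 0 0 ∧ rowB ≥ PySem.List.pyGetD cur 0 0 then
        1 + intervalSelectionLoopB rest' rowA rowB
      else
        intervalSelectionLoopB rest'
          (if rowB ≥ PySem.List.pyGetD cur 0 0 then rowB else rowA)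
          (PySem.List.pyGetD cur 1 0) := by
  rcases hr : intervalSelectionSkipRun rest' rowA rowB with ⟨k, r⟩
  by_cases hc : rowA ≥ PySem.List.pyGetD cur 0 0 ∧ rowB ≥ PySem.List.pyGetD cur 0 0
  · have hs : intervalSelectionSkipRun (cur :: rest') rowA rowB = (k + 1, r) := by
      rw [skipRun_cons, if_pos hc, hr]
    rw [if_pos hc, intervalSelectionLoopB, intervalSelectionLoopB]
    simp only [hs, hr]
    cases r with
    | nil => simp; ring
    | cons c r' => simp; ring
  · have hs : intervalSelectionSkipRun (cur :: rest') rowA rowB = (0, cur :: rest') := by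
      rw [skipRun_cons, if_neg hc]
    rw [if_neg hc, intervalSelectionLoopB]
    simp only [hs]
    simp

-- A's list-carrying loop equals (kept so far) + (rest length) - (B's skipped count),
-- under the correspondence rowB = ans[-1][1], rowA = limit.
lemma loopA_eq_loopB (rest : List (List Int)) :
    ∀ (ans : List (List Int)) (limit : Int), ans ≠ [] →
      intervalSelectionLoopA rest ans limit =
        (ans.length : Int) + (rest.length : Int) -
          intervalSelectionLoopB rest limit (PySem.List.pyGetD (PySem.List.pyGetD ans (-1) []) 1 0) := by
  induction rest with
  | nil =>
    intro ans limit _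
    simp [intervalSelectionLoopA, intervalSelectionLoopB, intervalSelectionSkipRun]
  | cons cur rest' ih =>
    intro ans limit h
    simp only [intervalSelectionLoopA]
    rw [pyGetD_neg_two_append_singleton ans cur h,
        PySem.List.pyGetD_neg_one_append_singleton, loopB_cons]
    by_cases h1 : PySem.List.pyGetD (PySem.List.pyGetD ans (-1) []) 1 0 ≥ PySem.List.pyGetD cur 0 0
    · by_cases h2 : limit ≥ PySem.List.pyGetD cur 0 0
      · -- skipped in both
        rw [if_pos h1, if_pos h2, if_pos ⟨h2, h1⟩, List.dropLast_concat, ih ans limit h]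
        simp only [List.length_cons]
        push_cast
        ring
      · -- kept, overlaps rowB: A sets limit := old tail end
        rw [if_pos h1, if_neg h2, if_neg (by tauto), if_pos h1,
            ih (ans ++ [cur]) _ (by simp), PySem.List.pyGetD_neg_one_append_singleton]
        simp only [List.length_append, List.length_cons, List.length_nil]
        push_cast
        ring
    · -- kept, no overlap with rowB
      rw [if_neg h1, if_neg (by tauto), if_neg h1,
          ih (ans ++ [cur]) limit (by simp), PySem.List.pyGetD_neg_one_append_singleton]
      simp only [List.length_append, List.length_cons, List.length_nil]
      push_cast
      ring

-- ===== VERDICT (by name: the statement is the Claim_ definition above) =====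
theorem intervalSelection_spec : Claim_equal_intervalSelection := by
  intro intervals _ hpre
  unfold Spec_intervalSelection intervalSelection intervalSelection_alt
  rw [loopA_eq_loopB _ _ _ (by simp)]
  rw [show ([PySem.List.pyGetD (PySem.List.sorted2 intervals (fun x => PySem.List.pyGetD x 1 0) (fun x => PySem.List.pyGetD x 0 0)) 0 []] : List (List Int)) = [] ++ [_] from rfl,
      PySem.List.pyGetD_neg_one_append_singleton]
  have hlen : 1 ≤ (PySem.List.sorted2 intervals (fun x => PySem.List.pyGetD x 1 0) (fun x => PySem.List.pyGetD x 0 0)).length := by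
    have hperm := (PySem.List.sorted2_perm intervals (fun x => PySem.List.pyGetD x 1 0) (fun x => PySem.List.pyGetD x 0 0) false).length_eq
    have hpos : 0 < intervals.length := List.length_pos_iff.mpr hpre.1
    omega
  simp only [List.nil_append, List.length_cons, List.length_nil, List.length_drop]
  push_cast [hlen]
  ring
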